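-- pv_equiv track=rewrite | github.com/ricaurtef/python_learning | Basics/cat_with_hats.py | cats_hats
-- ===== SOURCE A (Python) =====
-- def cats_hats(num_cats: int = 100) -> dict:
--     """TODO: function docstring."""
--     cats = {i: False for i in range(1, num_cats+1)}
--
--     for round_ in range(1, num_cats+1):
--         for cat in range(1, num_cats+1):
--             if cat % round_ == 0:
--                 if not cats[cat]:
--                     cats[cat] = True
--                 else:
--                     cats[cat] = False
--
--     return cats
-- ===== SOURCE B (Python) =====
-- def cats_hats(num_cats: int = 100) -> dict:
--     """A cat's hat is toggled once per divisor of its number, so it ends up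
--     on exactly when the number has an odd divisor count, i.e. is a perfect
--     square: mark the squares directly instead of simulating the rounds."""
--     cats = {i: False for i in range(1, num_cats + 1)}
--     j = 1
--     while j * j <= num_cats:
--         cats[j * j] = True
--         j += 1
--     return cats
-- ===== Notes on version B (the rewrite author's own statement) =====
-- stated objective: faster
-- what changed: B replaces the O(n^2) round-by-round toggling simulation with directly marking the perfect-square keys True (a cat's hat is toggled once per divisor, and only squares have an odd divisor count).
import Mathlib
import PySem

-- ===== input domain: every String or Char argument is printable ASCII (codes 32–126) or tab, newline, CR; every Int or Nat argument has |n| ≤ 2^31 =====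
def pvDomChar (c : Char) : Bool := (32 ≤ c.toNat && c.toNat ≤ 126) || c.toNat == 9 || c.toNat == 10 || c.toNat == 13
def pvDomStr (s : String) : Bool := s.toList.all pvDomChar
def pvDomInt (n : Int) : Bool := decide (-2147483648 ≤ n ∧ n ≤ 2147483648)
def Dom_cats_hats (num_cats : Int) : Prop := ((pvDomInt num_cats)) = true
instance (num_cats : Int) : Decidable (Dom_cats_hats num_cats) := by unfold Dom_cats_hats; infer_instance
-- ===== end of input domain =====

-- B marks the perfect-square keys directly instead of simulating the O(n^2) toggling rounds.

-- ===== PORT A =====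
-- one inner-loop body: `if cat % round_ == 0: cats[cat] = True if not cats[cat] else False`
-- (`cats[cat]` is ported as `getD cat false`; the key is always present, so this is exact)
def pvToggleStep (round_ : Int) (d : PySem.Dict Int Bool) (cat : Int) : PySem.Dict Int Bool :=
  if PySem.Int.mod cat round_ == 0 then
    if (d.getD cat false) == false then d.insert cat true else d.insert cat false
  else d

def cats_hats (num_cats : Int) : List (Int × Bool) :=
  let cats := (PySem.List.pyRange 1 (num_cats + 1) 1).foldl
      (fun d i => d.insert i false) PySem.Dict.empty
  ((PySem.List.pyRange 1 (num_cats + 1) 1).foldl (fun d round_ =>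
      (PySem.List.pyRange 1 (num_cats + 1) 1).foldl (pvToggleStep round_) d) cats).items

-- ===== PORT B =====
-- the `while j * j <= num_cats` loop of Source B
def markSquares (num_cats : Int) (j : Int) (d : PySem.Dict Int Bool) : PySem.Dict Int Bool :=
  if j * j ≤ num_cats then markSquares num_cats (j + 1) (d.insert (j * j) true) else d
termination_by (num_cats + 1 - j).toNat
decreasing_by
  have hj : j ≤ num_cats := by nlinarith [mul_self_nonneg j]
  omega

def cats_hats_alt (num_cats : Int) : List (Int × Bool) :=
  let cats := (PySem.List.pyRange 1 (num_cats + 1) 1).foldl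
      (fun d i => d.insert i false) PySem.Dict.empty
  (markSquares num_cats 1 cats).items

-- ===== PRECONDITION & SPEC =====
def Spec_cats_hats (num_cats : Int) (out : List (Int × Bool)) : Prop := out = cats_hats_alt num_cats
instance (num_cats : Int) (out : List (Int × Bool)) : Decidable (Spec_cats_hats num_cats out) := by unfold Spec_cats_hats; infer_instance

-- ===== CLAIM (what is proved, stated in full; the proofs are below) =====
def Claim_equal_cats_hats : Prop := ∀ (num_cats : Int), Dom_cats_hats num_cats → Spec_cats_hats num_cats (cats_hats num_cats)

-- ===== LEMMAS AND PROOFS =====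
lemma init_items (n : Int) :
    ((PySem.List.pyRange 1 (n + 1) 1).foldl (fun d i => d.insert i false)
      (PySem.Dict.empty : PySem.Dict Int Bool)).items
    = (PySem.List.pyRange 1 (n + 1) 1).map (fun i => (i, false)) := by
  have h := PySem.Dict.items_foldl_insert_fresh (l := PySem.List.pyRange 1 (n + 1) 1)
      (k := fun i => i) (v := fun _ => false) (d := (PySem.Dict.empty : PySem.Dict Int Bool))
      (by intro a _; simp) (by simpa using PySem.List.nodup_pyRange_one 1 (n+1))
  simpa using h

lemma keys_of_items_map (L : List Int) (g : Int → Bool) (d : PySem.Dict Int Bool)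
    (hd : d.items = L.map (fun i => (i, g i))) : d.keys = L := by
  simp [PySem.Dict.keys, hd, List.map_map, Function.comp_def]

lemma fold_toggle_items (round_ : Int) (m : List Int) : ∀ (L : List Int) (g : Int → Bool)
    (d : PySem.Dict Int Bool), (∀ x ∈ m, x ∈ L) → L.Nodup → m.Nodup →
    d.items = L.map (fun i => (i, g i)) →
    (m.foldl (pvToggleStep round_) d).items
      = L.map (fun i => (i, if i ∈ m ∧ PySem.Int.mod i round_ == 0 then !(g i) else g i)) := by
  induction m with
  | nil =>
    intro L g d _ _ _ hd
    simpa using hd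
  | cons c m' ih =>
    intro L g d hm hL hmn hd
    have hcL : c ∈ L := hm c (by simp)
    have hkeys : d.keys = L := keys_of_items_map L g d hd
    have hnodupk : d.keys.Nodup := by rw [hkeys]; exact hL
    have hmemit : (c, g c) ∈ d.items := by
      rw [hd]; exact List.mem_map_of_mem hcL
    have hget : d.getD c false = g c := PySem.Dict.getD_of_mem_items d hmemit hnodupk false
    have hcont : d.contains c = true := by
      rw [PySem.Dict.contains_iff_mem_keys, hkeys]; exact hcL
    have hcnot : c ∉ m' := by
      intro h; exact (List.nodup_cons.mp hmn).1 h
    simp only [List.foldl_cons]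
    by_cases hc : (PySem.Int.mod c round_ == 0) = true
    · -- toggled at c
      have hstep : pvToggleStep round_ d c = d.insert c (!(g c)) := by
        unfold pvToggleStep
        rw [hc, if_pos rfl, hget]
        cases g c <;> simp
      rw [hstep]
      have hitems : (d.insert c (!(g c))).items
          = L.map (fun i => (i, if i = c then !(g i) else g i)) := by
        rw [PySem.Dict.items_insert_of_contains d _ hcont, hd, List.map_map]
        refine List.map_congr_left ?_
        intro i _
        by_cases hic : i = c
        · subst hic; simp
        · simp [hic]
      have := ih L (fun i => if i = c then !(g i) else g i) _
        (fun x hx => hm x (by simp [hx])) hL (List.nodup_cons.mp hmn).2 hitems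
      rw [this]
      refine List.map_congr_left ?_
      intro i _
      by_cases hic : i = c
      · subst hic
        simp [hcnot, hc]
      · simp [hic]
    · -- condition false at c: step is the identity
      have hstep : pvToggleStep round_ d c = d := by
        unfold pvToggleStep
        simp [hc]
      rw [hstep]
      have := ih L g d (fun x hx => hm x (by simp [hx])) hL (List.nodup_cons.mp hmn).2 hd
      rw [this]
      refine List.map_congr_left ?_
      intro i _
      by_cases hic : i = c
      · subst hic; simp [hc]
      · simp [hic]

lemma outer_fold_items (n : Int) (rs : List Int) : ∀ (g : Int → Bool) (d : PySem.Dict Int Bool),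
    d.items = (PySem.List.pyRange 1 (n + 1) 1).map (fun i => (i, g i)) →
    (rs.foldl (fun d round_ =>
        (PySem.List.pyRange 1 (n + 1) 1).foldl (pvToggleStep round_) d) d).items
      = (PySem.List.pyRange 1 (n + 1) 1).map (fun i =>
          (i, rs.foldl (fun b r => if PySem.Int.mod i r == 0 then !b else b) (g i))) := by
  induction rs with
  | nil => intro g d hd; simpa using hd
  | cons r rs' ih =>
    intro g d hd
    simp only [List.foldl_cons]
    have h1 := fold_toggle_items r (PySem.List.pyRange 1 (n + 1) 1)
        (PySem.List.pyRange 1 (n + 1) 1) g d (fun x hx => hx)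
        (PySem.List.nodup_pyRange_one 1 (n + 1)) (PySem.List.nodup_pyRange_one 1 (n + 1)) hd
    have h2 : ((PySem.List.pyRange 1 (n + 1) 1).foldl (pvToggleStep r) d).items
        = (PySem.List.pyRange 1 (n + 1) 1).map
            (fun i => (i, if PySem.Int.mod i r == 0 then !(g i) else g i)) := by
      rw [h1]
      refine List.map_congr_left ?_
      intro i hi
      simp [hi]
    have := ih (fun i => if PySem.Int.mod i r == 0 then !(g i) else g i) _ h2
    rw [this]

lemma markSquares_items (n : Int) : ∀ (fuel : ℕ) (j : Int) (g : Int → Bool)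
    (d : PySem.Dict Int Bool), (n + 1 - j).toNat ≤ fuel → 1 ≤ j →
    d.items = (PySem.List.pyRange 1 (n + 1) 1).map (fun i => (i, g i)) →
    (markSquares n j d).items = (PySem.List.pyRange 1 (n + 1) 1).map (fun i =>
      (i, g i || (PySem.List.pyRange j (n + 1) 1).any (fun k => k * k == i))) := by
  intro fuel
  induction fuel with
  | zero =>
    intro j g d hfuel hj hd
    have hjn : n + 1 ≤ j := by omega
    have hnot : ¬ (j * j ≤ n) := by nlinarith
    rw [markSquares, if_neg hnot, hd, PySem.List.pyRange_one_eq_nil hjn]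
    simp
  | succ fuel ih =>
    intro j g d hfuel hj hd
    rw [markSquares]
    by_cases h : j * j ≤ n
    · have hjn : j ≤ n := by nlinarith
      have hsq1 : 1 ≤ j * j := by nlinarith
      have hmem : j * j ∈ PySem.List.pyRange 1 (n + 1) 1 :=
        PySem.List.mem_pyRange_one.mpr ⟨hsq1, by omega⟩
      have hcont : d.contains (j * j) = true := by
        rw [PySem.Dict.contains_iff_mem_keys, keys_of_items_map _ g d hd]
        exact hmem
      have hitems : (d.insert (j * j) true).items
          = (PySem.List.pyRange 1 (n + 1) 1).map (fun i => (i, g i || (j * j == i))) := by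
        rw [PySem.Dict.items_insert_of_contains d _ hcont, hd, List.map_map]
        refine List.map_congr_left ?_
        intro i _
        by_cases hij : i = j * j
        · subst hij; simp
        · have : (j * j == i) = false := by simp [Ne.symm hij]
          simp [hij, this]
      rw [if_pos h]
      have := ih (j + 1) (fun i => g i || (j * j == i)) _ (by omega) (by omega) hitems
      rw [this, PySem.List.pyRange_one_cons (by omega : j < n + 1)]
      refine List.map_congr_left ?_
      intro i _
      simp [Bool.or_assoc]
    · rw [if_neg h, hd]
      refine List.map_congr_left ?_
      intro i hi
      have hi' := PySem.List.mem_pyRange_one.mp hi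
      have hany : (PySem.List.pyRange j (n + 1) 1).any (fun k => k * k == i) = false := by
        rw [List.any_eq_false]
        intro k hk
        have hk' := PySem.List.mem_pyRange_one.mp hk
        have : ¬ (k * k = i) := by nlinarith
        simp [this]
      rw [hany]
      simp

lemma foldl_toggle_parity (p : Int → Bool) (l : List Int) : ∀ b : Bool,
    l.foldl (fun b r => if p r then !b else b) b = xor b (decide (l.countP p % 2 = 1)) := by
  induction l with
  | nil => intro b; simp
  | cons a l ih =>
    intro b
    rw [List.foldl_cons, List.countP_cons, ih]
    by_cases hp : p a = true
    · have h2 : ∀ c : ℕ, decide ((c + 1) % 2 = 1) = !(decide (c % 2 = 1)) := by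
        intro c
        rcases Nat.even_or_odd c with h | h
        · have h1 : c % 2 = 0 := Nat.even_iff.mp h
          have h2 : (c + 1) % 2 = 1 := by omega
          simp [h1, h2]
        · have h1 : c % 2 = 1 := Nat.odd_iff.mp h
          have h2 : (c + 1) % 2 = 0 := by omega
          simp [h1, h2]
      simp only [hp, if_true, h2]
      cases b <;> cases decide (l.countP p % 2 = 1) <;> rfl
    · simp [hp]

lemma odd_finset_prod {α : Type} (s : Finset α) (f : α → ℕ) :
    Odd (∏ i ∈ s, f i) ↔ ∀ i ∈ s, Odd (f i) := by
  classical
  induction s using Finset.induction_on with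
  | empty => simp
  | insert a s ha ih =>
    rw [Finset.prod_insert ha, Nat.odd_mul, ih]
    constructor
    · rintro ⟨h1, h2⟩ i hi
      rcases Finset.mem_insert.mp hi with rfl | hi
      · exact h1
      · exact h2 i hi
    · intro h
      exact ⟨h a (Finset.mem_insert_self a s), fun i hi => h i (Finset.mem_insert_of_mem hi)⟩

lemma isSquare_iff_even_factorization (I : ℕ) (hI : I ≠ 0) :
    IsSquare I ↔ ∀ p, Even (I.factorization p) := by
  constructor
  · rintro ⟨m, rfl⟩ p
    have hm : m ≠ 0 := by simpa using hI
    rw [Nat.factorization_mul hm hm]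
    simp
  · intro h
    refine ⟨I.factorization.prod (fun p e => p ^ (e / 2)), ?_⟩
    have key : I.factorization.prod (fun p e => p ^ (e / 2))
        * I.factorization.prod (fun p e => p ^ (e / 2))
        = I.factorization.prod (fun p e => p ^ e) := by
      rw [← Finsupp.prod_mul]
      refine Finsupp.prod_congr ?_
      intro p hp
      rw [← pow_add]
      congr 1
      have := (h p).two_dvd
      omega
    rw [key]
    have := Nat.prod_factorization_pow_eq_self hI
    simpa [Nat.factorization] using this.symm

lemma odd_card_divisors_iff (I : ℕ) (hI : I ≠ 0) :
    Odd I.divisors.card ↔ IsSquare I := by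
  rw [Nat.card_divisors hI, isSquare_iff_even_factorization I hI]
  rw [odd_finset_prod]
  constructor
  · intro h p
    by_cases hp : p ∈ I.primeFactors
    · rcases h p hp with ⟨k, hk⟩
      exact ⟨k, by omega⟩
    · rw [← Nat.support_factorization] at hp
      simp [Finsupp.notMem_support_iff.mp hp]
  · intro h p _
    rcases h p with ⟨k, hk⟩
    exact ⟨k, by omega⟩

lemma countP_range_eq_card_divisors (I M : ℕ) (h1 : 1 ≤ I) (h2 : I ≤ M) :
    (List.range M).countP (fun k => decide ((k + 1) ∣ I)) = I.divisors.card := by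
  have hcount : (List.range M).countP (fun k => decide ((k + 1) ∣ I))
      = ((Finset.range M).filter (fun k => (k + 1) ∣ I)).card := by
    rw [Finset.card_def, Finset.filter_val, Finset.range_val, Multiset.range]
    simp [Multiset.filter_coe, List.countP_eq_length_filter]
  rw [hcount]
  refine Finset.card_bij (fun k _ => k + 1) ?_ ?_ ?_
  · intro k hk
    have hk' := Finset.mem_filter.mp hk
    exact Nat.mem_divisors.mpr ⟨hk'.2, by omega⟩
  · intro a ha b hb hab
    simp only at hab
    omega
  · intro d hd
    have hdvd := (Nat.mem_divisors.mp hd).1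
    have hd1 : 1 ≤ d := Nat.pos_of_mem_divisors hd
    have hdI : d ≤ I := Nat.le_of_dvd (by omega) hdvd
    refine ⟨d - 1, Finset.mem_filter.mpr ⟨Finset.mem_range.mpr (by omega), ?_⟩, ?_⟩
    · have : d - 1 + 1 = d := by omega
      rw [this]
      exact hdvd
    · show d - 1 + 1 = d
      omega

lemma parity_eq_any_square (n i : Int) (h1 : 1 ≤ i) (h2 : i ≤ n) :
    decide ((PySem.List.pyRange 1 (n + 1) 1).countP
        (fun r => PySem.Int.mod i r == 0) % 2 = 1)
      = (PySem.List.pyRange 1 (n + 1) 1).any (fun k => k * k == i) := by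
  have hi0 : (0 : Int) ≤ i := by omega
  have hIpos : 1 ≤ i.toNat := by omega
  have hIM : i.toNat ≤ n.toNat := by omega
  have hInz : i.toNat ≠ 0 := by omega
  -- left side: divisor-count parity
  have hcount : (PySem.List.pyRange 1 (n + 1) 1).countP (fun r => PySem.Int.mod i r == 0)
      = (i.toNat).divisors.card := by
    rw [PySem.List.pyRange_one, List.countP_map]
    have hM : (n + 1 - 1).toNat = n.toNat := by omega
    rw [hM]
    have hcongr : ∀ k ∈ List.range n.toNat,
        ((fun r => PySem.Int.mod i r == 0) ∘ fun k : ℕ => (1 : Int) + ↑k) k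
          = (fun k : ℕ => decide ((k + 1) ∣ i.toNat)) k := by
      intro k _
      simp only [Function.comp]
      have h1k : (1 + (k : Int)) = ((k + 1 : ℕ) : Int) := by push_cast; ring
      have : (PySem.Int.mod i (1 + (k : Int)) == 0) = decide ((1 + (k : Int)) ∣ i) := by
        by_cases hd : (1 + (k : Int)) ∣ i
        · simp [hd, (PySem.Int.mod_eq_zero_iff_dvd i (1 + (k : Int))).mpr hd]
        · have : PySem.Int.mod i (1 + (k : Int)) ≠ 0 := by
            intro h; exact hd ((PySem.Int.mod_eq_zero_iff_dvd i (1 + (k : Int))).mp h)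
          simp [hd, this]
      rw [this, h1k]
      simp only [decide_eq_decide]
      rw [← Int.toNat_of_nonneg hi0]
      exact Int.natCast_dvd_natCast
    rw [List.countP_congr (fun x hx => by rw [hcongr x hx])]
    exact countP_range_eq_card_divisors i.toNat n.toNat hIpos hIM
  rw [hcount]
  -- right side: existence of an integer square root in range
  by_cases hs : IsSquare i.toNat
  · have hodd : (i.toNat).divisors.card % 2 = 1 :=
      Nat.odd_iff.mp ((odd_card_divisors_iff i.toNat hInz).mpr hs)
    rw [hodd]
    rcases hs with ⟨m, hm⟩
    have hm1 : 1 ≤ m := by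
      rcases Nat.eq_zero_or_pos m with h | h
      · subst h
        simp at hm
        omega
      · omega
    have hmle : m ≤ i.toNat := by
      calc m ≤ m * m := Nat.le_mul_of_pos_left m (by omega)
      _ = i.toNat := hm.symm
    have hmleI : (m : Int) ≤ i := by
      have h := (Nat.cast_le (α := ℤ)).mpr hmle
      rwa [Int.toNat_of_nonneg hi0] at h
    have hany : (PySem.List.pyRange 1 (n + 1) 1).any (fun k => k * k == i) = true := by
      rw [List.any_eq_true]
      refine ⟨(m : Int), PySem.List.mem_pyRange_one.mpr ⟨by exact_mod_cast Nat.one_le_cast.mpr hm1, by omega⟩, ?_⟩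
      have : ((m : Int)) * m = i := by
        have : ((m * m : ℕ) : Int) = ((i.toNat : ℕ) : Int) := by rw [← hm]
        push_cast at this
        rw [Int.toNat_of_nonneg hi0] at this
        linarith
      simp [this]
    rw [hany]
    simp
  · have heven : ¬ Odd (i.toNat).divisors.card := by
      intro h; exact hs ((odd_card_divisors_iff i.toNat hInz).mp h)
    have hmod : (i.toNat).divisors.card % 2 ≠ 1 := by
      intro h; exact heven (Nat.odd_iff.mpr h)
    have hany : (PySem.List.pyRange 1 (n + 1) 1).any (fun k => k * k == i) = false := by
      rw [List.any_eq_false]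
      intro k hk
      have hk' := PySem.List.mem_pyRange_one.mp hk
      intro hkk
      have hkk' : k * k = i := by simpa using hkk
      apply hs
      refine ⟨k.toNat, ?_⟩
      have hkn : ((k.toNat : ℕ) : Int) = k := Int.toNat_of_nonneg (by omega)
      have : ((k.toNat * k.toNat : ℕ) : Int) = ((i.toNat : ℕ) : Int) := by
        push_cast
        rw [hkn, Int.toNat_of_nonneg hi0]
        exact hkk'
      exact_mod_cast this.symm
    rw [hany]
    simp [hmod]

-- ===== VERDICT (by name: the statement is the Claim_ definition above) =====
theorem cats_hats_spec : Claim_equal_cats_hats := by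
  intro n _
  unfold Spec_cats_hats
  show cats_hats n = cats_hats_alt n
  unfold cats_hats cats_hats_alt
  rw [outer_fold_items n _ (fun _ => false) _ (init_items n)]
  rw [markSquares_items n n.toNat 1 (fun _ => false) _ (by omega) le_rfl (init_items n)]
  refine List.map_congr_left ?_
  intro i hi
  have hi' := PySem.List.mem_pyRange_one.mp hi
  rw [foldl_toggle_parity]
  simp only [Bool.false_xor, Bool.false_or]
  exact congrArg (Prod.mk i) (parity_eq_any_square n i (by omega) (by omega))
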